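-- pv_equiv track=rewrite | github.com/Cal9233/pdf_converting | pdf_v2/FINAL_WITH_OLDER_CHASE.py | fix_doubled_text
-- ===== SOURCE A (Python) =====
-- def fix_doubled_text(text):
--     """Fix doubled characters in text (e.g., 'MMaannaaggee' -> 'Manage')."""
--     if not text:
--         return text
--
--     # Check if text appears to have doubled characters
--     doubled_count = 0
--     for i in range(0, len(text) - 1, 2):
--         if i + 1 < len(text) and text[i] == text[i + 1]:
--             doubled_count += 1
--
--     # If more than 30% of character pairs are doubled, fix it
--     if doubled_count > len(text) / 4:
--         fixed_text = ''
--         i = 0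
--         while i < len(text):
--             if i + 1 < len(text) and text[i] == text[i + 1]:
--                 fixed_text += text[i]
--                 i += 2
--             else:
--                 fixed_text += text[i]
--                 i += 1
--         return fixed_text
--
--     return text
-- ===== SOURCE B (Python) =====
-- def fix_doubled_text(text):
--     """Fix doubled characters in text (e.g., 'MMaannaaggee' -> 'Manage')."""
--     if not text:
--         return text
--
--     # Count doubled pairs by chunking the text into non-overlapping pairs.
--     it = iter(text)
--     doubled = sum(a == b for a, b in zip(it, it))
--
--     # Same threshold as the original: doubled > len(text)/4 (exact for ints).
--     if 4 * doubled > len(text):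
--         # Collapse by maximal runs: a run of L equal chars yields ceil(L/2) copies.
--         out = []
--         i, n = 0, len(text)
--         while i < n:
--             j = i + 1
--             while j < n and text[j] == text[i]:
--                 j += 1
--             out.append(text[i] * ((j - i + 1) // 2))
--             i = j
--         return ''.join(out)
--
--     return text
-- ===== Notes on version B (the rewrite author's own statement) =====
-- stated objective: alternative
-- what changed: B counts doubled pairs by chunking the text into non-overlapping pairs (zip of one iterator with itself) and replaces the index-stepping greedy collapse with a run-length scan that emits ceil(L/2) copies of each maximal run of L equal characters, joined at the end.
import Mathlib
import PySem

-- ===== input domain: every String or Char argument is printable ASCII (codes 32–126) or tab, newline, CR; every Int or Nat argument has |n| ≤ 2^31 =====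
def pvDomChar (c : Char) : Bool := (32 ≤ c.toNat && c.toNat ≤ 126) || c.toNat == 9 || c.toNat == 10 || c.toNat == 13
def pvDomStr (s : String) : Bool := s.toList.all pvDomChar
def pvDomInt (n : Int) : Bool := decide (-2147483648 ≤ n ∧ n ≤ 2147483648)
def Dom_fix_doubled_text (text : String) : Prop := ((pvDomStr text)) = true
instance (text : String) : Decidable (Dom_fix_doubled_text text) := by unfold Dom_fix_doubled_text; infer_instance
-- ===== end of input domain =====

-- B replaces the index-stepping greedy collapse and ranged pair count with a
-- run-length collapse (each maximal run of L equal chars yields ⌈L/2⌉ copies)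
-- and a chunked pair count; objective: alternative (same cost, different algorithm).

-- ===== PORT A =====
-- the 'for i in range(0, len(text)-1, 2)' counting loop, as recursion on the index
def countLoopA (cs : List Char) (i : Nat) : Int :=
  if i + 1 < cs.length then
    (if i + 1 < cs.length ∧ cs.getD i ' ' = cs.getD (i + 1) ' ' then 1 else 0)
      + countLoopA cs (i + 2)
  else 0
termination_by cs.length - i

-- the 'while i < len(text)' greedy collapse loop, acc = fixed_text (as List Char)
def loopA (cs : List Char) (i : Nat) (acc : List Char) : List Char :=
  if i < cs.length then
    if i + 1 < cs.length ∧ cs.getD i ' ' = cs.getD (i + 1) ' ' then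
      loopA cs (i + 2) (acc ++ [cs.getD i ' '])
    else
      loopA cs (i + 1) (acc ++ [cs.getD i ' '])
  else acc
termination_by cs.length - i

def fix_doubled_text (text : String) : String :=
  let cs := text.toList
  if cs.isEmpty then text
  else
    let doubled := countLoopA cs 0
    -- 'doubled_count > len(text)/4' ported as 4*doubled > len: exact, since the
    -- Python float comparison of an int against n/4 (n an int) is exact here
    if 4 * doubled > (cs.length : Int) then String.ofList (loopA cs 0 [])
    else text

-- ===== PORT B =====
-- sum(a == b for a, b in zip(it, it)): the text chunked into non-overlapping pairs
def pairCountB : List Char → Int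
  | a :: b :: r => (if a = b then 1 else 0) + pairCountB r
  | _ => 0

-- the run-length collapse: a maximal run of L equal characters yields ⌈L/2⌉ copies
def runCollapse : List Char → List Char
  | [] => []
  | c :: rest =>
    List.replicate (((rest.takeWhile (fun d => d == c)).length + 2) / 2) c
      ++ runCollapse (rest.dropWhile (fun d => d == c))
termination_by cs => cs.length
decreasing_by
  exact Nat.lt_succ_of_le (List.length_dropWhile_le _ _)

def fix_doubled_text_alt (text : String) : String :=
  let cs := text.toList
  if cs.isEmpty then text
  else if 4 * pairCountB cs > (cs.length : Int) then String.ofList (runCollapse cs)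
  else text

-- ===== PRECONDITION & SPEC =====
def Spec_fix_doubled_text (text : String) (out : String) : Prop := out = fix_doubled_text_alt text
instance (text : String) (out : String) : Decidable (Spec_fix_doubled_text text out) := by unfold Spec_fix_doubled_text; infer_instance

-- ===== CLAIM (what is proved, stated in full; the proofs are below) =====
def Claim_equal_fix_doubled_text : Prop := ∀ (text : String), Dom_fix_doubled_text text → Spec_fix_doubled_text text (fix_doubled_text text)

-- ===== LEMMAS AND PROOFS =====

lemma runCollapse_nil : runCollapse [] = [] := by
  rw [runCollapse]

lemma pairCountB_short (cs : List Char) (h : cs.length ≤ 1) : pairCountB cs = 0 := by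
  match cs, h with
  | [], _ => rfl
  | [a], _ => rfl

lemma countLoopA_eq (cs : List Char) :
    ∀ k i, cs.length - i ≤ k → countLoopA cs i = pairCountB (cs.drop i) := by
  intro k
  induction k with
  | zero =>
    intro i h
    rw [countLoopA]
    have h1 : ¬ (i + 1 < cs.length) := by omega
    have h2 : cs.drop i = [] := List.drop_eq_nil_of_le (by omega)
    simp [h1, h2, pairCountB]
  | succ k ih =>
    intro i h
    rw [countLoopA]
    by_cases hc : i + 1 < cs.length
    · have hi : i < cs.length := by omega
      have hd : cs.drop i = cs[i] :: cs[i+1] :: cs.drop (i + 2) := by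
        rw [List.drop_eq_getElem_cons hi, List.drop_eq_getElem_cons hc]
      rw [hd, pairCountB, ih (i + 2) (by omega)]
      simp [hc, List.getD, List.getElem?_eq_getElem hi]
    · have h2 : (cs.drop i).length ≤ 1 := by simp; omega
      simp [hc, pairCountB_short _ h2]

lemma runCollapse_single (a : Char) : runCollapse [a] = [a] := by
  rw [runCollapse]
  simp [runCollapse_nil]

lemma runCollapse_cons_ne (a b : Char) (r : List Char) (h : a ≠ b) :
    runCollapse (a :: b :: r) = a :: runCollapse (b :: r) := by
  rw [runCollapse]
  have hb : (b == a) = false := by simp [beq_eq_false_iff_ne]; exact fun e => h e.symm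
  simp [List.takeWhile, List.dropWhile, hb]

lemma runCollapse_double (a : Char) (r : List Char) :
    runCollapse (a :: a :: r) = a :: runCollapse r := by
  rw [runCollapse]
  simp only [List.takeWhile, List.dropWhile, beq_self_eq_true]
  match r with
  | [] => simp [runCollapse_nil]
  | x :: r' =>
    by_cases hx : x = a
    · subst hx
      rw [runCollapse]
      simp only [List.takeWhile, List.dropWhile, beq_self_eq_true,
        List.length_cons]
      have : ((List.takeWhile (fun d => d == x) r').length + 1 + 1 + 2) / 2
          = ((List.takeWhile (fun d => d == x) r').length + 2) / 2 + 1 := by omega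
      rw [this, List.replicate_succ]
      simp
    · have hb : (x == a) = false := by simp [hx]
      simp [List.takeWhile, List.dropWhile, hb]

lemma loopA_eq (cs : List Char) :
    ∀ k i acc, cs.length - i ≤ k → loopA cs i acc = acc ++ runCollapse (cs.drop i) := by
  intro k
  induction k with
  | zero =>
    intro i acc h
    rw [loopA]
    have h1 : ¬ (i < cs.length) := by omega
    have h2 : cs.drop i = [] := List.drop_eq_nil_of_le (by omega)
    simp [h1, h2, runCollapse_nil]
  | succ k ih =>
    intro i acc h
    rw [loopA]
    by_cases hi : i < cs.length
    · have hd1 : cs.drop i = cs[i] :: cs.drop (i + 1) := List.drop_eq_getElem_cons hi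
      by_cases hc : i + 1 < cs.length ∧ cs.getD i ' ' = cs.getD (i + 1) ' '
      · obtain ⟨hc1, hc2⟩ := hc
        have hd2 : cs.drop (i + 1) = cs[i+1] :: cs.drop (i + 2) :=
          List.drop_eq_getElem_cons hc1
        have he : cs[i] = cs[i+1] := by
          rw [← List.getD_eq_getElem _ ' ' hi, ← List.getD_eq_getElem _ ' ' hc1]; exact hc2
        rw [if_pos hi, if_pos ⟨hc1, hc2⟩, ih (i + 2) _ (by omega), hd1, hd2, ← he,
          runCollapse_double, List.getD_eq_getElem _ ' ' hi]
        simp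
      · rw [if_pos hi, if_neg hc, ih (i + 1) _ (by omega), hd1,
          List.getD_eq_getElem _ ' ' hi]
        by_cases hc1 : i + 1 < cs.length
        · have hc2 : cs.getD i ' ' ≠ cs.getD (i + 1) ' ' := by tauto
          have hne : cs[i] ≠ cs[i+1] := by
            rw [← List.getD_eq_getElem _ ' ' hi, ← List.getD_eq_getElem _ ' ' hc1]; exact hc2
          rw [List.drop_eq_getElem_cons hc1, runCollapse_cons_ne _ _ _ hne,
            ← List.drop_eq_getElem_cons hc1]
          simp
        · have h2 : cs.drop (i + 1) = [] := List.drop_eq_nil_of_le (by omega)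
          rw [h2, runCollapse_single, runCollapse_nil]
          simp
    · have h2 : cs.drop i = [] := List.drop_eq_nil_of_le (by omega)
      rw [if_neg hi, h2, runCollapse_nil]
      simp

-- ===== VERDICT (by name: the statement is the Claim_ definition above) =====
theorem fix_doubled_text_spec : Claim_equal_fix_doubled_text := by
  intro text _
  unfold Spec_fix_doubled_text fix_doubled_text fix_doubled_text_alt
  simp only
  rw [countLoopA_eq text.toList text.toList.length 0 (by omega),
      loopA_eq text.toList text.toList.length 0 [] (by omega)]
  simp
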